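-- pv_equiv track=rewrite | github.com/Octopuss78/Forensick | forensick.py | parse_file_types
-- ===== SOURCE A (Python) =====
-- def parse_file_types(l):
--     types = ["PDF","Zlib"]
--     occ = [0,0]
--     res = []
--     for e in l:
--         if "PDF" in e:
--             occ[0]+=1
--         if "Zlib" in e:
--             occ[1]+=1
--     for i in range(len(occ)):
--         res.append((types[i],occ[i]))
--     return res
-- ===== SOURCE B (Python) =====
-- def parse_file_types(l):
--     types = ["PDF", "Zlib"]
--     return [(t, sum(1 for e in l if t in e)) for t in types]
-- ===== Notes on version B (the rewrite author's own statement) =====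
-- stated objective: simpler
-- what changed: B inverts the loop nesting: instead of one combined pass maintaining two counters and a second index loop assembling the result, it builds the result directly with one scan of the list per type.
import Mathlib
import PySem

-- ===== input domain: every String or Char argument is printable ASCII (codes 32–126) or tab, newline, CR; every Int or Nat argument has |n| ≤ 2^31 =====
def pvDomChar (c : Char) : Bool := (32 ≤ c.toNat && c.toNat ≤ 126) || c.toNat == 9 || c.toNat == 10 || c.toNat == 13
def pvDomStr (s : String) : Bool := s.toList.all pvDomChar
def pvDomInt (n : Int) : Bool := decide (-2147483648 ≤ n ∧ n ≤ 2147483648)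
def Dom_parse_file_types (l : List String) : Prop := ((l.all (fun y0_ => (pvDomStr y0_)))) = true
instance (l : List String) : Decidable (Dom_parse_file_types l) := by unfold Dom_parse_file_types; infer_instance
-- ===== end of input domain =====

-- B builds the result with one scan of the list per type instead of A's single combined pass with two counters; same cost, simpler shape (return value equivalence).
-- ===== PORT A =====
-- step of A's first loop: two independent substring tests bumping the two counters
def pftStep (occ : Int × Int) (e : String) : Int × Int :=
  let occ := if PySem.Str.isIn "PDF" e then (occ.1 + 1, occ.2) else occ
  if PySem.Str.isIn "Zlib" e then (occ.1, occ.2 + 1) else occ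

def parse_file_types (l : List String) : List (String × Int) :=
  let types : List String := ["PDF", "Zlib"]
  let occ : Int × Int := l.foldl pftStep (0, 0)
  (PySem.List.pyRange 0 2 1).foldl
    (fun res i => res ++ [(types.getD i.toNat "", [occ.1, occ.2].getD i.toNat 0)]) []

-- ===== PORT B =====
def parse_file_types_alt (l : List String) : List (String × Int) :=
  (["PDF", "Zlib"] : List String).map
    (fun t => (t, (l.countP (fun e => PySem.Str.isIn t e) : Int)))

-- ===== PRECONDITION & SPEC =====
def Spec_parse_file_types (l : List String) (out : List (String × Int)) : Prop := out = parse_file_types_alt l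
instance (l : List String) (out : List (String × Int)) : Decidable (Spec_parse_file_types l out) := by unfold Spec_parse_file_types; infer_instance

-- ===== CLAIM (what is proved, stated in full; the proofs are below) =====
def Claim_equal_parse_file_types : Prop := ∀ (l : List String), Dom_parse_file_types l → Spec_parse_file_types l (parse_file_types l)

-- ===== LEMMAS AND PROOFS =====
theorem pft_fold (l : List String) (a b : Int) :
    l.foldl pftStep (a, b)
    = (a + (l.countP (fun e => PySem.Str.isIn "PDF" e) : Int),
       b + (l.countP (fun e => PySem.Str.isIn "Zlib" e) : Int)) := by
  induction l generalizing a b with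
  | nil => simp
  | cons e t ih =>
    by_cases h1 : PySem.Str.isIn "PDF" e <;> by_cases h2 : PySem.Str.isIn "Zlib" e <;>
      simp only [List.foldl_cons, List.countP_cons, pftStep, h1, h2, if_true, if_false,
        Bool.false_eq_true, ih, Prod.mk.injEq] <;>
      constructor <;> push_cast <;> ring

-- ===== VERDICT (by name: the statement is the Claim_ definition above) =====
theorem parse_file_types_spec : Claim_equal_parse_file_types := by
  intro l _
  unfold Spec_parse_file_types parse_file_types parse_file_types_alt
  simp only [pft_fold]
  simp [PySem.List.pyRange, List.range_succ]
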